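-- pv_equiv track=rewrite | github.com/Koozzi/Algorithms | BJ/implementation/G4_17135_20210124.py | enemy_move
-- ===== SOURCE A (Python) =====
-- from collections import deque
--
-- def enemy_move(N, M, board):
--     get_to_castle = 0
--
--     for j in range(M):
--         q = deque([])
--
--         for i in range(N-1, -1, -1):
--             q.append(board[i][j])
--
--         if q[0] == 1:
--             get_to_castle += 1
--
--         q.popleft()
--         q.append(0)
--
--         for i in range(N-1, -1, -1):
--             board[i][j] = q[0]
--             q.popleft()
--
--     return board, get_to_castle
-- ===== SOURCE B (Python) =====
-- def enemy_move(N, M, board):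
--     get_to_castle = sum(1 for j in range(M) if board[N - 1][j] == 1)
--     carry = [0] * M
--     for row in board[:N]:
--         for j in range(M):
--             row[j], carry[j] = carry[j], row[j]
--     return board, get_to_castle
-- ===== Notes on version B (the rewrite author's own statement) =====
-- stated objective: alternative
-- what changed: Replaces the per-column deque rotate-and-write-back with one count of the bottom row plus a single top-down pass over the rows that swaps each cell with a zero-initialised carry row (each row receives the row above it in place); Pre_ excludes only inputs where A raises IndexError.
import Mathlib
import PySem

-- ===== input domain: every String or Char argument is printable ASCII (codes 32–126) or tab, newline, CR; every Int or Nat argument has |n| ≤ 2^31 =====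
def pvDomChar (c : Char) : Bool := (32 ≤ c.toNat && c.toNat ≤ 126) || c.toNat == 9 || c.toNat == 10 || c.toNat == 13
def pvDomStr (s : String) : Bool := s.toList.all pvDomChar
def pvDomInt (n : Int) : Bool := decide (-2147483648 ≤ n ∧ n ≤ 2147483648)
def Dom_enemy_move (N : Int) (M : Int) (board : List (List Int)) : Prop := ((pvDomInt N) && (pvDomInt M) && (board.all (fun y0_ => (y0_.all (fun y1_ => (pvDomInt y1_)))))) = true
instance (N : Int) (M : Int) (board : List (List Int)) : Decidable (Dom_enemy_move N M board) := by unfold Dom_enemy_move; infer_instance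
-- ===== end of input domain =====

-- B replaces A's per-column deque rotation by one count of the bottom row plus an in-place
-- row-by-row downward shift and a zero fill of the top row (simpler). Both A and B mutate
-- `board` in place in Python; the equivalence proved here is about the RETURN value.

-- ===== PORT A =====
-- board[i][j] read with Python indexing; default only reached outside Pre_.
def pyCellGet (b : List (List Int)) (i j : Int) : Int :=
  (PySem.List.pyGet? ((PySem.List.pyGet? b i).getD []) j).getD 0

-- board[i][j] = v ; i, j are loop indices, always ≥ 0 wherever the ports use this.
def pyCellSet (b : List (List Int)) (i j : Int) (v : Int) : List (List Int) :=
  b.modify i.toNat (fun row => row.set j.toNat v)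

-- the body of A's outer `for j in range(M)` loop
def aCol (N : Int) (j : Int) (st : List (List Int) × Int) : List (List Int) × Int :=
  -- q = deque([]); for i in range(N-1,-1,-1): q.append(board[i][j])
  let q : List Int :=
    (PySem.List.pyRange (N - 1) (-1) (-1)).foldl (fun q i => q ++ [pyCellGet st.1 i j]) []
  -- if q[0] == 1: get_to_castle += 1
  let c : Int := if q.getD 0 0 == 1 then st.2 + 1 else st.2
  -- q.popleft(); q.append(0)
  let q2 := q.drop 1 ++ [0]
  -- for i in range(N-1,-1,-1): board[i][j] = q[0]; q.popleft()
  let wr :=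
    (PySem.List.pyRange (N - 1) (-1) (-1)).foldl
      (fun (st2 : List (List Int) × List Int) i =>
        (pyCellSet st2.1 i j (st2.2.getD 0 0), st2.2.drop 1)) (st.1, q2)
  (wr.1, c)

def enemy_move (N : Int) (M : Int) (board : List (List Int)) : List (List Int) × Int :=
  (PySem.List.pyRange 0 M 1).foldl (fun st j => aCol N j st) (board, 0)

-- ===== PORT B =====
-- one swap `row[j], carry[j] = carry[j], row[j]` (both reads before both writes)
def bSwapCell (rc : List Int × List Int) (j : Int) : List Int × List Int :=
  let t1 := (PySem.List.pyGet? rc.2 j).getD 0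
  let t2 := (PySem.List.pyGet? rc.1 j).getD 0
  (rc.1.set j.toNat t1, rc.2.set j.toNat t2)

-- one iteration of `for row in board[:N]`: swap the first M cells with the carry
def bShiftRow (M : Int) (st : List (List Int) × List Int) (row : List Int) :
    List (List Int) × List Int :=
  let rc := (PySem.List.pyRange 0 M 1).foldl bSwapCell (row, st.2)
  (st.1 ++ [rc.1], rc.2)

def enemy_move_alt (N : Int) (M : Int) (board : List (List Int)) : List (List Int) × Int :=
  -- get_to_castle = sum(1 for j in range(M) if board[N-1][j] == 1)
  let cnt : Int :=
    (PySem.List.pyRange 0 M 1).foldl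
      (fun c j => if pyCellGet board (N - 1) j == 1 then c + 1 else c) 0
  -- carry = [0] * M
  let carry0 : List Int := List.replicate M.toNat 0
  -- for row in board[:N]: for j in range(M): row[j], carry[j] = carry[j], row[j]
  -- PySem has no heap: each row object of board[:N] is mutated in place, and board[:N]
  -- is a prefix of board, so the mutated board is exactly the list of mutated rows
  -- followed by the untouched remaining rows (exact for every input).
  let rows := PySem.List.slice board none (some N)
  let st := rows.foldl (bShiftRow M) ([], carry0)
  (st.1 ++ board.drop rows.length, cnt)

-- ===== PRECONDITION & SPEC =====
-- Pre_ excludes exactly the inputs where A raises IndexError: when M > 0, A needs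
-- 1 ≤ N ≤ len(board) and every one of the first N rows to have at least M entries.
def Pre_enemy_move (N : Int) (M : Int) (board : List (List Int)) : Prop :=
  0 < M → 1 ≤ N ∧ N ≤ board.length ∧ ∀ r ∈ board.take N.toNat, M ≤ (r.length : Int)
instance (N : Int) (M : Int) (board : List (List Int)) : Decidable (Pre_enemy_move N M board) := by
  unfold Pre_enemy_move; infer_instance

def pvWitness_enemy_move : Int × Int × List (List Int) := (2, 2, [[1, 0], [0, 1]])

def Spec_enemy_move (N : Int) (M : Int) (board : List (List Int)) (out : List (List Int) × Int) : Prop := out = enemy_move_alt N M board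
instance (N : Int) (M : Int) (board : List (List Int)) (out : List (List Int) × Int) : Decidable (Spec_enemy_move N M board out) := by unfold Spec_enemy_move; infer_instance

-- ===== CLAIM (what is proved, stated in full; the proofs are below) =====
def Claim_equal_enemy_move : Prop := ∀ (N : Int) (M : Int) (board : List (List Int)), Dom_enemy_move N M board → Pre_enemy_move N M board → Spec_enemy_move N M board (enemy_move N M board)


-- ===== LEMMAS AND PROOFS =====

-- row i of the original board (as read by both programs); [] only outside the used range
def bRowD (b : List (List Int)) (i : Nat) : List Int := b.getD i []

-- the row above row i in the shifted picture: zeros for row 0, else original row i-1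
def prevRowD (b : List (List Int)) (m i : Nat) : List Int :=
  if i = 0 then List.replicate m 0 else bRowD b (i - 1)

-- rows with their first j columns shifted down (prev = the row feeding row 0)
def shiftTo (j : Nat) (prev : List Int) : List (List Int) → List (List Int)
  | [] => []
  | r :: rs => (prev.take j ++ r.drop j) :: shiftTo j r rs

-- the board after A has processed columns 0..j-1
def mixB (n m j : Nat) (b : List (List Int)) : List (List Int) :=
  shiftTo j (List.replicate m 0) (b.take n) ++ b.drop n

-- the counter after A has processed columns 0..j-1
def cntTo (b : List (List Int)) (n j : Nat) : Int :=
  ((bRowD b (n - 1)).take j).foldl (fun c x => if x == 1 then c + 1 else c) 0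

lemma shiftTo_length (j : Nat) (prev : List Int) (rows : List (List Int)) :
    (shiftTo j prev rows).length = rows.length := by
  induction rows generalizing prev with
  | nil => simp [shiftTo]
  | cons r rs ih => simp [shiftTo, ih]

lemma shiftTo_zero (prev : List Int) (rows : List (List Int)) : shiftTo 0 prev rows = rows := by
  induction rows generalizing prev with
  | nil => simp [shiftTo]
  | cons r rs ih => simp [shiftTo, ih]

lemma shiftTo_getElem? (j : Nat) (prev : List Int) (rows : List (List Int)) (i : Nat) :
    (shiftTo j prev rows)[i]? =
      rows[i]?.map (fun r => ((prev :: rows).getD i []).take j ++ r.drop j) := by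
  induction rows generalizing prev i with
  | nil => simp [shiftTo]
  | cons r rs ih => cases i with
    | zero => simp [shiftTo]
    | succ i => simp [shiftTo, ih r i]

lemma prevRowD_len (b : List (List Int)) (n m i : Nat) (hi : i < n) (hnb : n ≤ b.length)
    (hrow : ∀ r ∈ b.take n, m ≤ r.length) : m ≤ (prevRowD b m i).length := by
  unfold prevRowD
  by_cases h0 : i = 0
  · simp [h0]
  · simp only [h0, if_false]
    apply hrow
    have h1 : i - 1 < n := by omega
    have h2 : i - 1 < b.length := by omega
    have : bRowD b (i - 1) = b[i - 1] := by
      simp [bRowD, List.getD_eq_getElem?_getD, List.getElem?_eq_getElem h2]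
    rw [this]
    exact List.mem_take_iff_getElem.mpr ⟨i - 1, by simpa using ⟨h1, h2⟩, rfl⟩

lemma bRowD_len (b : List (List Int)) (n m i : Nat) (hi : i < n) (hnb : n ≤ b.length)
    (hrow : ∀ r ∈ b.take n, m ≤ r.length) : m ≤ (bRowD b i).length := by
  have h2 : i < b.length := by omega
  have : bRowD b i = b[i] := by
    simp [bRowD, List.getD_eq_getElem?_getD, List.getElem?_eq_getElem h2]
  rw [this]
  exact hrow _ (List.mem_take_iff_getElem.mpr ⟨i, by simpa using ⟨hi, h2⟩, rfl⟩)

lemma bRowD_some (b : List (List Int)) (i : Nat) (hi : i < b.length) :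
    b[i]? = some (bRowD b i) := by
  simp [bRowD, List.getD_eq_getElem?_getD, List.getElem?_eq_getElem hi]

lemma mixB_getElem_lt (b : List (List Int)) (n m j i : Nat) (hi : i < n) (hnb : n ≤ b.length) :
    (mixB n m j b)[i]? = some ((prevRowD b m i).take j ++ (bRowD b i).drop j) := by
  have hlen : (shiftTo j (List.replicate m 0) (b.take n)).length = n := by
    rw [shiftTo_length]; simp [hnb]
  have hib : i < b.length := by omega
  rw [mixB, List.getElem?_append, hlen, if_pos hi, shiftTo_getElem?]
  have ht : (b.take n)[i]? = some b[i] := by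
    rw [List.getElem?_take, if_pos hi, List.getElem?_eq_getElem hib]
  rw [ht]
  have hprev : ((List.replicate m 0 :: b.take n)[i]?.getD []).take j = (prevRowD b m i).take j := by
    cases i with
    | zero => simp [prevRowD]
    | succ i' =>
      have hi' : i' < n := by omega
      simp only [List.getElem?_cons_succ, List.getElem?_take, if_pos hi']
      simp [prevRowD, bRowD, List.getD_eq_getElem?_getD]
  have hrr : b[i] = bRowD b i := by
    simp [bRowD, List.getD_eq_getElem?_getD, List.getElem?_eq_getElem hib]
  simp only [Option.map_some, Option.some.injEq, List.getD_eq_getElem?_getD] at *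
  rw [hprev, hrr]

lemma mixB_getElem_ge (b : List (List Int)) (n m j i : Nat) (hi : n ≤ i) (hnb : n ≤ b.length) :
    (mixB n m j b)[i]? = b[i]? := by
  have hlen : (shiftTo j (List.replicate m 0) (b.take n)).length = n := by
    rw [shiftTo_length]; simp [hnb]
  rw [mixB, List.getElem?_append, hlen, if_neg (by omega), List.getElem?_drop]
  congr 1; omega

-- reading an as-yet-unshifted column of the mixed board gives the original value
lemma mix_read (b : List (List Int)) (n m j' i jc : Nat)
    (hnb : n ≤ b.length) (hrow : ∀ r ∈ b.take n, m ≤ r.length)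
    (hj' : j' ≤ m) (hi : i < n) (hjc : j' ≤ jc) (hjcm : jc < m) :
    pyCellGet (mixB n m j' b) (i : Int) (jc : Int) = (bRowD b i).getD jc 0 := by
  have hp : j' ≤ (prevRowD b m i).length :=
    le_trans hj' (prevRowD_len b n m i hi hnb hrow)
  have hrl : jc < (bRowD b i).length :=
    lt_of_lt_of_le hjcm (bRowD_len b n m i hi hnb hrow)
  have htl : ((prevRowD b m i).take j').length = j' := by simp [hp]
  rw [pyCellGet, PySem.List.pyGet?_natCast (mixB n m j' b) i, mixB_getElem_lt b n m j' i hi hnb,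
    Option.getD_some, PySem.List.pyGet?_natCast, List.getElem?_append, htl,
    if_neg (by omega), List.getElem?_drop]
  have : j' + (jc - j') = jc := by omega
  rw [this, List.getElem?_eq_getElem hrl]
  simp [List.getD_eq_getElem?_getD, List.getElem?_eq_getElem hrl]

-- plain cell read at nonnegative indices
lemma cell_read (b : List (List Int)) (i j : Nat) :
    pyCellGet b (i : Int) (j : Int) = (bRowD b i).getD j 0 := by
  rw [pyCellGet, PySem.List.pyGet?_natCast, PySem.List.pyGet?_natCast]
  simp [bRowD, List.getD_eq_getElem?_getD]

lemma fold_set_desc (j : Nat) : ∀ (n : Nat) (v : Nat → Int) (b : List (List Int)) (i : Nat),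
    ((List.range n).foldl (fun b' k => b'.modify (n - 1 - k) (fun row => row.set j (v k))) b)[i]? =
      if i < n then b[i]?.map (fun r => r.set j (v (n - 1 - i))) else b[i]? := by
  intro n
  induction n with
  | zero => intro v b i; simp
  | succ n ih =>
    intro v b i
    rw [List.range_succ_eq_map, List.foldl_cons, List.foldl_map]
    have estep : (fun (x : List (List Int)) (y : Nat) =>
        x.modify (n + 1 - 1 - y.succ) (fun row => row.set j (v y.succ)))
        = (fun (x : List (List Int)) (y : Nat) =>
        x.modify (n - 1 - y) (fun row => row.set j ((fun k => v (k + 1)) y))) := by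
      have h1 : ∀ y : Nat, n + 1 - 1 - (y + 1) = n - 1 - y := by omega
      funext x y
      rw [Nat.succ_eq_add_one, h1]
    rw [estep, ih (fun k => v (k + 1))]
    have hmod : ∀ i' : Nat, (b.modify (n + 1 - 1 - 0) (fun row => row.set j (v 0)))[i']? =
        (fun a => if n = i' then a.set j (v 0) else a) <$> b[i']? := by
      intro i'
      rw [show n + 1 - 1 - 0 = n from by omega, List.getElem?_modify]
    by_cases hlt : i < n
    · rw [if_pos hlt, if_pos (by omega), hmod i,
        show n + 1 - 1 - i = n - 1 - i + 1 from by omega]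
      cases b[i]? with
      | none => simp
      | some r => simp [show ¬ n = i from by omega]
    · by_cases heq : i = n
      · subst heq
        rw [if_neg (by omega), if_pos (by omega), hmod i]
        cases b[i]? with
        | none => simp
        | some r => simp
      · rw [if_neg (by omega), if_neg (by omega), hmod i]
        cases b[i]? with
        | none => simp
        | some r => simp [show ¬ n = i from by omega]

lemma write_fold_fst (j : Int) : ∀ (is : List Int) (vs : List Int), is.length ≤ vs.length →
    ∀ (b : List (List Int)),
    ((is.foldl (fun (st2 : List (List Int) × List Int) i =>
        (pyCellSet st2.1 i j (st2.2.getD 0 0), st2.2.drop 1)) (b, vs)).1)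
      = (is.zip vs).foldl (fun b' p => pyCellSet b' p.1 j p.2) b := by
  intro is
  induction is with
  | nil => simp
  | cons i is ih =>
    intro vs h b
    cases vs with
    | nil => simp at h
    | cons v vs =>
      rw [List.foldl_cons, List.zip_cons_cons, List.foldl_cons]
      exact ih vs (by simpa using h) _

lemma set_mix_row (prev r : List Int) (m j : Nat) (hj : j < m)
    (hp : m ≤ prev.length) (hr : m ≤ r.length) :
    (prev.take j ++ r.drop j).set j (prev.getD j 0) = prev.take (j + 1) ++ r.drop (j + 1) := by
  have hpj : j < prev.length := by omega
  have hrj : j < r.length := by omega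
  have htl : (prev.take j).length = j := by rw [List.length_take]; omega
  rw [List.set_append, htl, if_neg (by omega), Nat.sub_self,
    List.drop_eq_getElem_cons hrj, List.set_cons_zero, List.take_add_one,
    List.getElem?_eq_getElem hpj]
  rw [show (some prev[j]).toList = [prev[j]] from rfl, List.append_assoc,
    List.singleton_append, List.getD_eq_getElem?_getD, List.getElem?_eq_getElem hpj,
    Option.getD_some]

lemma cntTo_succ (b : List (List Int)) (n m j : Nat) (hj : j < m)
    (hlen : m ≤ (bRowD b (n - 1)).length) :
    cntTo b n (j + 1) =
      if (bRowD b (n - 1)).getD j 0 == 1 then cntTo b n j + 1 else cntTo b n j := by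
  have hj' : j < (bRowD b (n - 1)).length := by omega
  rw [cntTo, List.take_add_one, List.getElem?_eq_getElem hj', List.foldl_append]
  simp [cntTo, List.getD_eq_getElem?_getD, List.getElem?_eq_getElem hj']

lemma aCol_step (N : Int) (b : List (List Int)) (n m j : Nat) (hN : N = (n : Int))
    (hn : 1 ≤ n) (hnb : n ≤ b.length) (hrow : ∀ r ∈ b.take n, m ≤ r.length)
    (hj : j < m) (c : Int) :
    aCol N (j : Int) (mixB n m j b, c) =
      (mixB n m (j + 1) b, if (bRowD b (n - 1)).getD j 0 == 1 then c + 1 else c) := by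
  subst hN
  have hR : PySem.List.pyRange ((n : Int) - 1) (-1) (-1)
      = (List.range n).map (fun k : Nat => (n : Int) - 1 - (k : Int)) := by
    rw [PySem.List.pyRange_neg_one, show (((n : Int) - 1) - (-1)).toNat = n from by omega]
  -- the values A's queue holds, and the values it writes back
  have hq : (List.foldl (fun q i => q ++ [pyCellGet (mixB n m j b) i (j : Int)]) []
        ((List.range n).map (fun k : Nat => (n : Int) - 1 - (k : Int))))
      = (List.range n).map (fun k => (bRowD b (n - 1 - k)).getD j 0) := by
    rw [List.foldl_map, PySem.List.foldl_append_singleton_eq_map, List.nil_append]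
    apply List.map_congr_left
    intro k hk
    rw [List.mem_range] at hk
    rw [show (n : Int) - 1 - (k : Int) = ((n - 1 - k : Nat) : Int) from by omega]
    exact mix_read b n m j (n - 1 - k) j hnb hrow (le_of_lt hj) (by omega) le_rfl hj
  have hq0 : ((List.range n).map (fun k => (bRowD b (n - 1 - k)).getD j 0)).getD 0 0
      = (bRowD b (n - 1)).getD j 0 := by
    rw [PySem.List.getD_map_range _ n 0 0 hn, Nat.sub_zero]
  have hq2 : ((List.range n).map (fun k => (bRowD b (n - 1 - k)).getD j 0)).drop 1 ++ [0]
      = (List.range n).map (fun k =>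
          if k + 1 = n then 0 else (bRowD b (n - 1 - (k + 1))).getD j 0) := by
    apply List.ext_getElem?
    intro i
    rw [List.getElem?_append, List.length_drop, List.length_map, List.length_range]
    by_cases h1 : i < n - 1
    · rw [if_pos (by omega), List.getElem?_drop, List.getElem?_map, List.getElem?_map,
        List.getElem?_range (show 1 + i < n from by omega),
        List.getElem?_range (show i < n from by omega)]
      simp only [Option.map_some, Option.some.injEq]
      rw [if_neg (by omega), show 1 + i = i + 1 from by omega]
    · rw [if_neg (by omega)]
      by_cases h2 : i = n - 1
      · subst h2
        rw [Nat.sub_self, List.getElem?_map, List.getElem?_range (show n - 1 < n from by omega)]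
        simp only [List.getElem?_cons_zero, Option.map_some, Option.some.injEq]
        rw [if_pos (by omega)]
      · rw [List.getElem?_map, show [(0 : Int)][i - (n - 1)]? = none from
          List.getElem?_eq_none (by simp; omega),
          List.getElem?_eq_none (by rw [List.length_range]; omega)]
        simp
  -- the write-back loop produces the (j+1)-shifted board
  have hw : ((List.map (fun k : Nat => (n : Int) - 1 - (k : Int)) (List.range n)).foldl
        (fun (st2 : List (List Int) × List Int) i =>
          (pyCellSet st2.1 i (j : Int) (st2.2.getD 0 0), st2.2.drop 1))
        (mixB n m j b,
          (List.range n).map (fun k =>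
            if k + 1 = n then 0 else (bRowD b (n - 1 - (k + 1))).getD j 0))).1
      = mixB n m (j + 1) b := by
    rw [write_fold_fst (j : Int) _ _ (by simp), List.zip_map', List.foldl_map]
    rw [PySem.List.foldl_congr_mem _ _
      (fun (b' : List (List Int)) (k : Nat) => b'.modify (n - 1 - k)
        (fun row => row.set j (if k + 1 = n then 0 else (bRowD b (n - 1 - (k + 1))).getD j 0))) _
      (by
        intro acc k hk
        simp only [pyCellSet]
        rw [show ((n : Int) - 1 - (k : Int)).toNat = n - 1 - k from by
          rw [List.mem_range] at hk; omega,
          show ((j : Nat) : Int).toNat = j from by omega])]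
    apply List.ext_getElem?
    intro i
    rw [fold_set_desc]
    by_cases hi : i < n
    · rw [if_pos hi, mixB_getElem_lt b n m j i hi hnb, mixB_getElem_lt b n m (j + 1) i hi hnb]
      simp only [Option.map_some, Option.some.injEq]
      have hv : (if (n - 1 - i) + 1 = n then 0
            else (bRowD b (n - 1 - ((n - 1 - i) + 1))).getD j 0)
          = (prevRowD b m i).getD j 0 := by
        by_cases h0 : i = 0
        · subst h0
          rw [if_pos (by omega), prevRowD, if_pos rfl, List.getD_eq_getElem?_getD,
            List.getElem?_replicate, if_pos (by omega)]
          rfl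
        · rw [if_neg (by omega), prevRowD, if_neg h0,
            show n - 1 - ((n - 1 - i) + 1) = i - 1 from by omega]
      rw [hv]
      exact set_mix_row (prevRowD b m i) (bRowD b i) m j hj
        (prevRowD_len b n m i hi hnb hrow) (bRowD_len b n m i hi hnb hrow)
    · rw [if_neg hi, mixB_getElem_ge b n m j i (by omega) hnb,
        mixB_getElem_ge b n m (j + 1) i (by omega) hnb]
  -- assemble the column body
  simp only [aCol, hR, hq, hq0, hq2, hw]

lemma col_fold_inv (N : Int) (b : List (List Int)) (n m : Nat) (hN : N = (n : Int))
    (hn : 1 ≤ n) (hnb : n ≤ b.length) (hrow : ∀ r ∈ b.take n, m ≤ r.length) :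
    ∀ j : Nat, j ≤ m →
      (PySem.List.pyRange 0 (j : Int) 1).foldl (fun st jc => aCol N jc st) (b, 0)
        = (mixB n m j b, cntTo b n j) := by
  intro j
  induction j with
  | zero =>
    intro _
    rw [Nat.cast_zero, PySem.List.pyRange_one_eq_nil le_rfl, List.foldl_nil]
    rw [mixB, shiftTo_zero, List.take_append_drop]
    rfl
  | succ j ih =>
    intro hj1
    rw [show ((j + 1 : Nat) : Int) = (j : Int) + 1 from by push_cast; ring,
      PySem.List.pyRange_one_succ_right (by omega), List.foldl_append, ih (by omega),
      List.foldl_cons, List.foldl_nil, aCol_step N b n m j hN hn hnb hrow (by omega),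
      cntTo_succ b n m j (by omega) (bRowD_len b n m (n - 1) (by omega) hnb hrow)]

-- ===== B-side lemmas =====

-- B's count loop equals A's counter
lemma cnt_inv (b : List (List Int)) (n m : Nat) (hnb : n ≤ b.length) (hn : 1 ≤ n)
    (hrow : ∀ r ∈ b.take n, m ≤ r.length) :
    ∀ j : Nat, j ≤ m →
      (PySem.List.pyRange 0 (j : Int) 1).foldl
        (fun c jc => if pyCellGet b ((n : Int) - 1) jc == 1 then c + 1 else c) 0
        = cntTo b n j := by
  intro j
  induction j with
  | zero =>
    intro _
    rw [Nat.cast_zero, PySem.List.pyRange_one_eq_nil le_rfl, List.foldl_nil]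
    simp [cntTo]
  | succ j ih =>
    intro hj1
    rw [show ((j + 1 : Nat) : Int) = (j : Int) + 1 from by push_cast; ring,
      PySem.List.pyRange_one_succ_right (by omega), List.foldl_append, ih (by omega),
      List.foldl_cons, List.foldl_nil,
      show (n : Int) - 1 = ((n - 1 : Nat) : Int) from by omega, cell_read,
      cntTo_succ b n m j (by omega) (bRowD_len b n m (n - 1) (by omega) hnb hrow)]

-- B's inner loop: swapping the first j' cells of a row with the carry
lemma swap_loop (m : Nat) :
    ∀ (j' : Nat), j' ≤ m → ∀ (r c : List Int), m ≤ r.length → c.length = m →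
      (PySem.List.pyRange 0 (j' : Int) 1).foldl bSwapCell (r, c)
      = (c.take j' ++ r.drop j', r.take j' ++ c.drop j') := by
  intro j'
  induction j' with
  | zero =>
    intro _ r c _ _
    rw [Nat.cast_zero, PySem.List.pyRange_one_eq_nil le_rfl, List.foldl_nil]
    simp
  | succ j' ih =>
    intro hj1 r c hr hc
    rw [show ((j' + 1 : Nat) : Int) = (j' : Int) + 1 from by push_cast; ring,
      PySem.List.pyRange_one_succ_right (by omega), List.foldl_append,
      ih (by omega) r c hr hc, List.foldl_cons, List.foldl_nil]
    simp only [bSwapCell]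
    have hjr : j' < r.length := by omega
    have hjc : j' < c.length := by omega
    have htr : (r.take j').length = j' := by rw [List.length_take]; omega
    have htc : (c.take j').length = j' := by rw [List.length_take]; omega
    have hread2 : (PySem.List.pyGet? (r.take j' ++ c.drop j') ((j' : Nat) : Int)).getD 0
        = c.getD j' 0 := by
      rw [PySem.List.pyGet?_natCast, List.getElem?_append, htr, if_neg (by omega),
        Nat.sub_self, List.getElem?_drop, Nat.add_zero]
      simp [List.getD_eq_getElem?_getD]
    have hread1 : (PySem.List.pyGet? (c.take j' ++ r.drop j') ((j' : Nat) : Int)).getD 0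
        = r.getD j' 0 := by
      rw [PySem.List.pyGet?_natCast, List.getElem?_append, htc, if_neg (by omega),
        Nat.sub_self, List.getElem?_drop, Nat.add_zero]
      simp [List.getD_eq_getElem?_getD]
    simp only [hread1, hread2, show ((j' : Nat) : Int).toNat = j' from by omega]
    rw [set_mix_row c r m j' (by omega) (by omega) hr,
      set_mix_row r c m j' (by omega) hr (by omega)]

-- appending one row to a shifted block
lemma shiftTo_snoc (j : Nat) (p : List Int) :
    ∀ (xs : List (List Int)) (y : List Int),
      shiftTo j p (xs ++ [y]) = shiftTo j p xs ++ [(xs.getLastD p).take j ++ y.drop j] := by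
  intro xs
  induction xs generalizing p with
  | nil => intro y; simp [shiftTo]
  | cons r rs ih =>
    intro y
    rw [List.cons_append, shiftTo, shiftTo, ih r y, List.getLastD_cons, List.cons_append]

lemma getLastD_take (b : List (List Int)) (z : List Int) (i : Nat) (hi : i ≤ b.length) :
    (b.take i).getLastD z = if i = 0 then z else bRowD b (i - 1) := by
  cases i with
  | zero => simp
  | succ i' =>
    have hlen : (b.take (i' + 1)).length = i' + 1 := by rw [List.length_take]; omega
    have hne : b.take (i' + 1) ≠ [] := by
      intro h; rw [h] at hlen; simp at hlen
    rw [List.getLastD_eq_getLast?, List.getLast?_eq_getElem?, hlen]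
    rw [List.getElem?_take, if_pos (by omega), if_neg (by omega), Nat.add_sub_cancel,
      bRowD_some b i' (by omega), Option.getD_some]

-- B's outer pass: after the first i rows, they are shifted and the carry holds row i-1
lemma swap_rows (b : List (List Int)) (n m : Nat) (hnb : n ≤ b.length)
    (hrow : ∀ r ∈ b.take n, m ≤ r.length) :
    ∀ i : Nat, i ≤ n →
      (b.take i).foldl (bShiftRow ((m : Nat) : Int)) ([], List.replicate m 0)
      = (shiftTo m (List.replicate m 0) (b.take i), (prevRowD b m i).take m) := by
  intro i
  induction i with
  | zero =>
    intro _
    rw [List.take_zero, List.foldl_nil]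
    simp [shiftTo, prevRowD, List.take_replicate]
  | succ i ih =>
    intro hi1
    have hib : i < b.length := by omega
    rw [List.take_add_one, List.getElem?_eq_getElem hib,
      show (some b[i]).toList = [b[i]] from rfl, List.foldl_append, ih (by omega),
      List.foldl_cons, List.foldl_nil]
    have hrl : m ≤ (bRowD b i).length := bRowD_len b n m i (by omega) hnb hrow
    have hpl : m ≤ (prevRowD b m i).length := prevRowD_len b n m i (by omega) hnb hrow
    have hcl : ((prevRowD b m i).take m).length = m := by rw [List.length_take]; omega
    have hbi : b[i] = bRowD b i := by
      rw [bRowD, List.getD_eq_getElem?_getD, List.getElem?_eq_getElem hib, Option.getD_some]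
    simp only [hbi, bShiftRow]
    rw [swap_loop m m le_rfl (bRowD b i) ((prevRowD b m i).take m) hrl hcl]
    have hc1 : ((prevRowD b m i).take m).take m = (prevRowD b m i).take m := by
      rw [List.take_take, Nat.min_self]
    have hc2 : ((prevRowD b m i).take m).drop m = [] := by
      rw [List.drop_eq_nil_iff, hcl]
    have hsnoc := shiftTo_snoc m (List.replicate m 0) (b.take i) (bRowD b i)
    rw [getLastD_take b (List.replicate m 0) i (by omega)] at hsnoc
    have hprev : (if i = 0 then List.replicate m 0 else bRowD b (i - 1)) = prevRowD b m i := by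
      rw [prevRowD]
    rw [hprev] at hsnoc
    have hcarry : (bRowD b i).take m = (prevRowD b m (i + 1)).take m := by
      rw [prevRowD, if_neg (by omega), Nat.add_sub_cancel]
    rw [hsnoc]
    simp only [hc1, hc2, List.append_nil, hcarry]

-- the trivial pass when M ≤ 0: every row is appended unchanged
lemma pass_id (MM : Int) (hMM : MM ≤ 0) (carry : List Int) :
    ∀ (rows acc : List (List Int)),
      rows.foldl (bShiftRow MM) (acc, carry) = (acc ++ rows, carry) := by
  intro rows
  induction rows with
  | nil => intro acc; simp
  | cons r rs ih =>
    intro acc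
    have hstep : bShiftRow MM (acc, carry) r = (acc ++ [r], carry) := by
      rw [bShiftRow, PySem.List.pyRange_one_eq_nil hMM, List.foldl_nil]
    rw [List.foldl_cons, hstep, ih (acc ++ [r]), List.append_assoc, List.singleton_append]

-- a Python prefix slice xs[:b] is a List.take, for every b
lemma slice_to_is_take (xs : List (List Int)) (b : Int) :
    ∃ k : Nat, PySem.List.slice xs none (some b) = xs.take k := by
  by_cases h : 0 ≤ b
  · exact ⟨b.toNat, PySem.List.slice_to xs h⟩
  · have hk0 : 0 < (-b).toNat := by omega
    have hb : b = -(((-b).toNat : Nat) : Int) := by omega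
    refine ⟨xs.length - (-b).toNat, ?_⟩
    conv_lhs => rw [hb]
    exact PySem.List.slice_to_neg_natCast xs ((-b).toNat) hk0

-- a prefix followed by the rest of the list is the list
lemma prefix_restore (xs : List (List Int)) (k : Nat) :
    xs.take k ++ xs.drop (xs.take k).length = xs := by
  have h : xs.take ((xs.take k).length) = xs.take k := by
    by_cases hk : k ≤ xs.length
    · rw [List.length_take, Nat.min_eq_left hk]
    · rw [List.length_take, Nat.min_eq_right (by omega), List.take_length,
        List.take_of_length_le (by omega)]
  calc xs.take k ++ xs.drop (xs.take k).length
      = xs.take ((xs.take k).length) ++ xs.drop (xs.take k).length := by rw [h]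
    _ = xs := List.take_append_drop _ xs

-- ===== VERDICT (by name: the statement is the Claim_ definition above) =====
theorem enemy_move_spec : Claim_equal_enemy_move := by
  intro N M b _ hpre
  show enemy_move N M b = enemy_move_alt N M b
  by_cases hM : M ≤ 0
  · rw [enemy_move, enemy_move_alt, PySem.List.pyRange_one_eq_nil hM, List.foldl_nil]
    simp only [List.foldl_nil]
    obtain ⟨k', hk'⟩ := slice_to_is_take b N
    rw [hk', pass_id M hM (List.replicate M.toNat 0) (b.take k') [], List.nil_append,
      prefix_restore b k']
  · obtain ⟨hN1, hNb, hrowI⟩ := hpre (by omega)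
    have hNn : N = (N.toNat : Int) := by omega
    have hMm : M = (M.toNat : Int) := by omega
    set n := N.toNat with hndef
    set m := M.toNat with hmdef
    have hn : 1 ≤ n := by omega
    have hnb : n ≤ b.length := by omega
    have hrow : ∀ r ∈ b.take n, m ≤ r.length := by
      intro r hr
      have := hrowI r hr
      omega
    have hA : enemy_move N M b = (mixB n m m b, cntTo b n m) := by
      rw [enemy_move, hMm]
      exact col_fold_inv N b n m hNn hn hnb hrow m le_rfl
    have hB : enemy_move_alt N M b = (mixB n m m b, cntTo b n m) := by
      rw [enemy_move_alt]
      simp only [hNn, hMm, Int.toNat_natCast]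
      have hcnt := cnt_inv b n m hnb hn hrow m le_rfl
      have hsl : PySem.List.slice b none (some ((n : Nat) : Int)) = b.take n :=
        PySem.List.slice_to_natCast b n
      rw [hcnt, hsl, swap_rows b n m hnb hrow n le_rfl]
      have hlen : (b.take n).length = n := by rw [List.length_take]; omega
      rw [hlen, mixB]
    rw [hA, hB]
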